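-- pv_equiv track=rewrite | github.com/IPESE/ROSMOSE | codes_02_heat_recovery/result/compare-tool.py | substring_unit_name
-- ===== SOURCE A (Python) =====
-- def substring_unit_name(uname):
--     name_tab = uname.split("_")
--     if len(name_tab) > 4:
--         name = ""
--         for i in range(3, len(name_tab)):
--             name += name_tab[i] + " "
--         return name[:-1]
--     elif len(name_tab) == 4:
--         return name_tab[3]
--     else:
--         return uname
-- ===== SOURCE B (Python) =====
-- def substring_unit_name(uname):
--     parts = uname.split("_", 3)
--     if len(parts) == 4:
--         return parts[3].replace("_", " ")
--     return uname
-- ===== Notes on version B (the rewrite author's own statement) =====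
-- stated objective: simpler
-- what changed: B replaces A's full underscore split followed by an explicit index loop with string concatenation and a three-way branch by a single bounded split with maxsplit 3: if it yields 4 parts the tail has its underscores replaced by spaces, otherwise uname is returned unchanged.
import Mathlib
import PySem

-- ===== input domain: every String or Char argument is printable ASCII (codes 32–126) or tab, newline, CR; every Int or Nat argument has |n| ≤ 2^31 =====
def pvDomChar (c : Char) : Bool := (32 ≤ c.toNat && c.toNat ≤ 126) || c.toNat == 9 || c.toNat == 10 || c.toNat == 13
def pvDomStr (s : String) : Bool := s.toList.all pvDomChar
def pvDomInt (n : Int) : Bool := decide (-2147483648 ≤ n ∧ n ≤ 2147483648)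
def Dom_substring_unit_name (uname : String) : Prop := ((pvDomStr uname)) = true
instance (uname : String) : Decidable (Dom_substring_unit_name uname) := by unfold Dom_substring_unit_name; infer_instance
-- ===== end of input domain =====

-- B replaces A's full split + index loop with string concatenation + three-way branch by one
-- bounded underscore split with maxsplit 3 and a replace on the tail; same value, simpler code.

-- ===== PORT A =====
-- A: full underscore split; if more than 4 parts, loop i = 3..len-1 accumulating name_tab[i] plus a space
-- then drop the last char (name[:-1]); if exactly 4 parts, name_tab[3]; else uname.
def substring_unit_name (uname : String) : String :=
  let name_tab := (PySem.Chars.split? uname.toList ['_']).getD []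
  if name_tab.length > 4 then
    let name := (PySem.List.pyRange 3 (name_tab.length : Int) 1).foldl
      (fun name i => name ++ ((PySem.List.pyGet? name_tab i).getD []) ++ [' ']) ([] : List Char)
    String.ofList (PySem.List.slice name none (some (-1)))
  else if name_tab.length = 4 then
    String.ofList ((PySem.List.pyGet? name_tab (3 : Int)).getD [])
  else uname

-- ===== PORT B =====
-- B: bounded underscore split with maxsplit 3; if it has 4 parts, return the tail with underscores replaced by spaces, else uname.
def substring_unit_name_alt (uname : String) : String :=
  match PySem.Chars.splitMax? uname.toList ['_'] 3 with
  | none => uname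
  | some parts =>
    if parts.length = 4 then
      String.ofList (PySem.Chars.replace ((PySem.List.pyGet? parts (3 : Int)).getD []) ['_'] [' '])
    else uname

-- ===== PRECONDITION & SPEC =====
def Spec_substring_unit_name (uname : String) (out : String) : Prop := out = substring_unit_name_alt uname
instance (uname : String) (out : String) : Decidable (Spec_substring_unit_name uname out) := by unfold Spec_substring_unit_name; infer_instance

-- ===== CLAIM (what is proved, stated in full; the proofs are below) =====
def Claim_equal_substring_unit_name : Prop := ∀ (uname : String), Dom_substring_unit_name uname → Spec_substring_unit_name uname (substring_unit_name uname)

-- ===== LEMMAS AND PROOFS =====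
def glueP (p : List Char) : List (List Char) → List (List Char)
  | [] => [p]
  | x :: xs => (p ++ x) :: xs
def splitF : List Char → List (List Char)
  | [] => [[]]
  | c :: t => if c = '_' then [] :: splitF t else glueP [c] (splitF t)
theorem splitF_ne_nil (l : List Char) : splitF l ≠ [] := by
  induction l with
  | nil => simp [splitF]
  | cons c t ih =>
    simp only [splitF]; split_ifs with hc
    · simp
    · cases h : splitF t <;> simp [glueP]
theorem goF (fuel : Nat) : ∀ (l cur : List Char) (acc : List (List Char)), l.length ≤ fuel →
    PySem.Chars.splitOn.go ['_'] fuel l cur acc = acc.reverse ++ glueP cur.reverse (splitF l) := by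
  induction fuel with
  | zero => intro l cur acc h
            have : l = [] := List.eq_nil_of_length_eq_zero (Nat.le_zero.mp h)
            subst this
            simp [PySem.Chars.splitOn.go, splitF, glueP]
  | succ n ih =>
    intro l cur acc h
    cases l with
    | nil => simp [PySem.Chars.splitOn.go, splitF, glueP]
    | cons c rest =>
      simp only [PySem.Chars.splitOn.go, List.isPrefixOf, List.length_cons] at *
      by_cases hc : c = '_'
      · subst hc
        simp only [beq_self_eq_true, Bool.true_and, if_pos, List.length_nil,
          Nat.zero_add, List.drop_succ_cons, List.drop_zero]
        rw [ih rest [] (cur.reverse :: acc) (by omega)]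
        rcases hF : splitF rest with _ | ⟨x, xs⟩
        · exact absurd hF (splitF_ne_nil rest)
        · simp [splitF, glueP, hF]
      · rw [if_neg (by simp; exact fun h => hc h.symm)]
        rw [ih rest (c :: cur) acc (by omega)]
        rcases hF : splitF rest with _ | ⟨x, xs⟩
        · exact absurd hF (splitF_ne_nil rest)
        · simp [splitF, glueP, hF, hc]
def splitM : Nat → List Char → List (List Char)
  | _, [] => [[]]
  | 0, l => [l]
  | m + 1, c :: t => if c = '_' then [] :: splitM m t else glueP [c] (splitM (m + 1) t)
theorem splitM_ne_nil (m : Nat) (l : List Char) : splitM m l ≠ [] := by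
  induction l generalizing m with
  | nil => simp [splitM]
  | cons c t ih =>
    cases m with
    | zero => simp [splitM]
    | succ m =>
      simp only [splitM]; split_ifs with hc
      · simp
      · cases h : splitM (m+1) t <;> simp [glueP]
theorem goM (fuel : Nat) : ∀ (m : Nat) (l cur : List Char) (acc : List (List Char)), l.length ≤ fuel →
    PySem.Chars.splitOnMax.go ['_'] fuel m l cur acc = acc.reverse ++ glueP cur.reverse (splitM m l) := by
  induction fuel with
  | zero => intro m l cur acc h
            have : l = [] := List.eq_nil_of_length_eq_zero (Nat.le_zero.mp h)
            subst this
            simp [PySem.Chars.splitOnMax.go, splitM, glueP]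
  | succ n ih =>
    intro m l cur acc h
    cases l with
    | nil => simp [PySem.Chars.splitOnMax.go, splitM, glueP]
    | cons c rest =>
      simp only [PySem.Chars.splitOnMax.go, List.length_cons] at *
      cases m with
      | zero => simp [splitM, glueP]
      | succ m =>
        rw [if_neg (by omega)]
        by_cases hc : c = '_'
        · subst hc
          simp only [List.isPrefixOf, beq_self_eq_true, Bool.true_and, List.isPrefixOf_nil_left,
            if_pos, List.length_nil, Nat.zero_add, List.drop_succ_cons, List.drop_zero,
            Nat.add_sub_cancel]
          rw [ih m rest [] (cur.reverse :: acc) (by omega)]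
          rcases hF : splitM m rest with _ | ⟨x, xs⟩
          · exact absurd hF (splitM_ne_nil m rest)
          · simp [splitM, glueP, hF]
        · rw [if_neg (by simp; exact fun h => hc h.symm)]
          rw [ih (m+1) rest (c :: cur) acc (by omega)]
          rcases hF : splitM (m+1) rest with _ | ⟨x, xs⟩
          · exact absurd hF (splitM_ne_nil (m+1) rest)
          · simp [splitM, glueP, hF, hc]
def subChar (c : Char) : Char := if c = '_' then ' ' else c
theorem goR (fuel : Nat) : ∀ (l acc : List Char), l.length ≤ fuel →
    PySem.Chars.replace.go ['_'] [' '] fuel l acc = acc.reverse ++ l.map subChar := by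
  induction fuel with
  | zero => intro l acc h
            have : l = [] := List.eq_nil_of_length_eq_zero (Nat.le_zero.mp h)
            subst this
            simp [PySem.Chars.replace.go]
  | succ n ih =>
    intro l acc h
    cases l with
    | nil => simp [PySem.Chars.replace.go]
    | cons c rest =>
      simp only [PySem.Chars.replace.go, List.length_cons] at *
      by_cases hc : c = '_'
      · subst hc
        simp only [List.isPrefixOf, beq_self_eq_true, Bool.true_and, List.isPrefixOf_nil_left,
          if_pos, List.length_nil, Nat.zero_add, List.drop_succ_cons, List.drop_zero]
        rw [ih rest ([' '].reverse ++ acc) (by omega)]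
        simp [subChar]
      · rw [if_neg (by simp; exact fun h => hc h.symm)]
        rw [ih rest (c :: acc) (by omega)]
        simp [subChar, hc]
def myJoin (s : List Char) : List (List Char) → List Char
  | [] => []
  | [x] => x
  | x :: y :: ys => x ++ s ++ myJoin s (y :: ys)
theorem myJoin_glueP (s p : List Char) (F : List (List Char)) (h : F ≠ []) :
    myJoin s (glueP p F) = p ++ myJoin s F := by
  match F with
  | [] => exact absurd rfl h
  | [x] => simp [glueP, myJoin]
  | x :: y :: ys => simp [glueP, myJoin]
theorem myJoin_splitF (l : List Char) : myJoin ['_'] (splitF l) = l := by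
  induction l with
  | nil => simp [splitF, myJoin]
  | cons c t ih =>
    simp only [splitF]
    split_ifs with hc
    · subst hc
      rcases hF : splitF t with _ | ⟨x, xs⟩
      · exact absurd hF (splitF_ne_nil t)
      · rw [hF] at ih; simp [myJoin, ih]
    · rw [myJoin_glueP _ _ _ (splitF_ne_nil t), ih]; rfl
theorem splitM_eq (m : Nat) (l : List Char) :
    splitM m l = if (splitF l).length ≤ m then splitF l
      else (splitF l).take m ++ [myJoin ['_'] ((splitF l).drop m)] := by
  induction l generalizing m with
  | nil =>
    cases m with
    | zero => simp [splitM, splitF, myJoin]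
    | succ m => simp [splitM, splitF]
  | cons c t ih =>
    cases m with
    | zero =>
      rw [if_neg (by have := splitF_ne_nil (c :: t); simp; omega)]
      simp only [splitM, List.take_zero, List.drop_zero, List.nil_append]
      rw [myJoin_splitF]
    | succ m =>
      simp only [splitM, splitF]
      split_ifs with hc hle hle
      · -- c = '_', length ≤ m+1
        subst hc
        have h' : (splitF t).length ≤ m := by simpa using hle
        rw [ih m, if_pos h']
      · subst hc
        have h' : ¬ (splitF t).length ≤ m := by simpa using hle
        rw [ih m, if_neg h']
        simp
      · -- c ≠ '_'
        rcases hF : splitF t with _ | ⟨x, xs⟩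
        · exact absurd hF (splitF_ne_nil t)
        · have h' : (splitF t).length ≤ m + 1 := by
            rw [hF] at hle ⊢; simpa [glueP] using hle
          rw [ih (m+1), if_pos h', hF]
      · rcases hF : splitF t with _ | ⟨x, xs⟩
        · exact absurd hF (splitF_ne_nil t)
        · have h' : ¬ (splitF t).length ≤ m + 1 := by
            rw [hF] at hle ⊢; simpa [glueP] using hle
          rw [ih (m+1), if_neg h', hF]
          simp [glueP]
theorem no_underscore_splitF (l : List Char) : ∀ p ∈ splitF l, '_' ∉ p := by
  induction l with
  | nil => simp [splitF]
  | cons c t ih =>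
    simp only [splitF]
    split_ifs with hc
    · intro p hp
      rcases List.mem_cons.mp hp with h | h
      · subst h; simp
      · exact ih p h
    · rcases hF : splitF t with _ | ⟨x, xs⟩
      · exact absurd hF (splitF_ne_nil t)
      · rw [hF] at ih
        intro p hp
        rcases List.mem_cons.mp hp with h | h
        · subst h
          intro hmem
          rcases (by simpa using hmem : '_' = c ∨ '_' ∈ x) with h1 | h2
          · exact hc h1.symm
          · exact ih x (by simp) h2
        · exact ih p (by simp [h])
theorem map_sub_myJoin (ps : List (List Char)) (h : ∀ p ∈ ps, '_' ∉ p) :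
    (myJoin ['_'] ps).map subChar = myJoin [' '] ps := by
  match ps with
  | [] => simp [myJoin]
  | [x] =>
    simp only [myJoin]
    exact List.map_congr_left (fun c hc => by
      simp [subChar]; intro h'; exact absurd (h' ▸ hc) (h x (by simp))) |>.trans (List.map_id x)
  | x :: y :: ys =>
    have hx : List.map subChar x = x :=
      (List.map_congr_left (fun c hc => by
        simp [subChar]; intro h'; exact absurd (h' ▸ hc) (h x (by simp)))).trans (List.map_id x)
    have hrec := map_sub_myJoin (y :: ys) (fun p hp => h p (by simp [List.mem_cons] at hp ⊢; tauto))
    simp only [myJoin, List.map_append, hx, hrec]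
    simp [subChar]
theorem loopA (tab : List (List Char)) : ∀ (k : Nat) (acc : List Char), k ≤ tab.length →
    (PySem.List.pyRange (k : Int) (tab.length : Int) 1).foldl
      (fun name i => name ++ ((PySem.List.pyGet? tab i).getD []) ++ [' ']) acc
      = acc ++ ((tab.drop k).map (· ++ [' '])).flatten := by
  intro k
  induction hn : tab.length - k generalizing k with
  | zero =>
    intro acc hk
    have hk' : k = tab.length := by omega
    have : PySem.List.pyRange (k : Int) (tab.length : Int) 1 = [] := by
      rw [hk']; simp [PySem.List.pyRange]
    rw [this, hk']
    simp
  | succ n ih =>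
    intro acc hk
    have hlt : k < tab.length := by omega
    rw [PySem.List.pyRange_one_cons (by exact_mod_cast hlt)]
    simp only [List.foldl_cons]
    have hcast : ((k : Int) + 1) = ((k + 1 : Nat) : Int) := by push_cast; ring
    rw [hcast, ih (k+1) (by omega) _ hlt]
    have hget : (PySem.List.pyGet? tab (k : Int)).getD [] = tab[k]'hlt := by
      simp [PySem.List.pyGet?_natCast, List.getElem?_eq_getElem hlt]
    rw [hget]
    have hd : List.drop k tab = tab[k]'hlt :: List.drop (k+1) tab := (List.getElem_cons_drop hlt).symm
    rw [hd]
    simp only [List.map_cons, List.flatten_cons, List.append_assoc, List.singleton_append,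
      List.cons_append, List.nil_append]
theorem dropLast_flat (ps : List (List Char)) (h : ps ≠ []) :
    ((ps.map (· ++ [' '])).flatten).dropLast = myJoin [' '] ps := by
  match ps with
  | [] => exact absurd rfl h
  | [x] => simp [myJoin]
  | x :: y :: ys =>
    have hne : (((y :: ys).map (· ++ [' '])).flatten) ≠ [] := by simp
    rw [List.map_cons, List.flatten_cons, List.dropLast_append_of_ne_nil hne,
      dropLast_flat (y :: ys) (by simp)]
    simp [myJoin]
theorem glueP_nil (F : List (List Char)) (h : F ≠ []) : glueP [] F = F := by
  cases F with
  | nil => exact absurd rfl h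
  | cons x xs => simp [glueP]
theorem main_eq (uname : String) : substring_unit_name uname = substring_unit_name_alt uname := by
  have h3 : (3 : Int) = ((3 : Nat) : Int) := by norm_num
  have hF := splitF_ne_nil uname.toList
  have hsplit : (PySem.Chars.split? uname.toList ['_']).getD [] = splitF uname.toList := by
    simp only [PySem.Chars.split?, PySem.Chars.splitOn, List.isEmpty_cons, if_false, Bool.false_eq_true]
    rw [goF (uname.toList.length + 1) uname.toList [] [] (by omega)]
    simp [glueP_nil _ hF]
  have hmax : PySem.Chars.splitMax? uname.toList ['_'] 3 = some (splitM 3 uname.toList) := by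
    simp only [PySem.Chars.splitMax?, PySem.Chars.splitOnMax, List.isEmpty_cons]
    rw [if_neg (by simp), if_neg (by omega)]
    rw [goM (uname.toList.length + 1) (Int.toNat 3) uname.toList [] [] (by omega)]
    simp [glueP_nil _ (splitM_ne_nil 3 uname.toList)]
  have hKey := splitM_eq 3 uname.toList
  simp only [substring_unit_name, substring_unit_name_alt, hsplit, hmax]
  by_cases h4 : (splitF uname.toList).length ≤ 3
  · rw [if_pos h4] at hKey
    rw [if_neg (by omega), if_neg (by omega), if_neg (by rw [hKey]; omega)]
  · rw [if_neg h4] at hKey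
    have hlen3 : ((splitF uname.toList).take 3).length = 3 := by
      rw [List.length_take]; omega
    have hlen : (splitM 3 uname.toList).length = 4 := by
      rw [hKey]; simp [hlen3]
    have hdropne : (splitF uname.toList).drop 3 ≠ [] := by
      apply List.ne_nil_of_length_pos; rw [List.length_drop]; omega
    have hB : (PySem.List.pyGet? (splitM 3 uname.toList) (3 : Int)).getD []
        = myJoin ['_'] ((splitF uname.toList).drop 3) := by
      rw [hKey, h3, PySem.List.pyGet?_natCast]
      rw [List.getElem?_append_right (by simp [hlen3])]
      simp [hlen3]
    have hnou : ∀ p ∈ (splitF uname.toList).drop 3, '_' ∉ p :=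
      fun p hp => no_underscore_splitF uname.toList p (List.mem_of_mem_drop hp)
    have hrep : PySem.Chars.replace (myJoin ['_'] ((splitF uname.toList).drop 3)) ['_'] [' ']
        = myJoin [' '] ((splitF uname.toList).drop 3) := by
      simp only [PySem.Chars.replace, List.isEmpty_cons, Bool.false_eq_true, if_false]
      rw [goR _ _ _ (le_refl _)]
      simpa using map_sub_myJoin _ hnou
    rw [if_pos hlen, hB, hrep]
    by_cases h5 : (splitF uname.toList).length > 4
    · rw [if_pos h5]
      rw [h3, loopA (splitF uname.toList) 3 [] (by omega)]
      rw [PySem.List.slice_to_neg_one]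
      rw [List.nil_append, dropLast_flat _ hdropne]
    · have h44 : (splitF uname.toList).length = 4 := by omega
      rw [if_neg h5, if_pos h44]
      have hd : (splitF uname.toList).drop 3 = [(splitF uname.toList)[3]'(by omega)] := by
        rw [← List.getElem_cons_drop (by omega)]
        rw [List.drop_eq_nil_of_le (by omega)]
      rw [hd]
      simp only [myJoin]
      rw [h3, PySem.List.pyGet?_natCast]
      simp [List.getElem?_eq_getElem (by omega : 3 < (splitF uname.toList).length)]

-- ===== VERDICT (by name: the statement is the Claim_ definition above) =====
theorem substring_unit_name_spec : Claim_equal_substring_unit_name :=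
  fun uname _ => main_eq uname
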